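-- pv_equiv track=rewrite | github.com/carelribaltchenko/initdev2023 | oiseaux.py | est_liste_observations
-- ===== SOURCE A (Python) =====
-- def est_trié(liste_observations):
--     for i in range(1,len(liste_observations)):
--         if liste_observations[i-1][0]>liste_observations[i][0]:
--             return False
--     return True
--
-- def est_liste_observations(liste_observations):
--     """verifie si c'est une liste d'observation
--
--     Args:
--         liste_observations (list): une liste de tuples
--
--     Returns:
--         bool: True si 'est une liste d'observation et false sinon
--     """
--     if liste_observations==[]:
--         return None
--     if not est_trié(liste_observations):
--         return False
--     for i in range(len(liste_observations)):
--         if liste_observations[i][1]==0: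
--             return False
--     return True
-- ===== SOURCE B (Python) =====
-- def est_liste_observations(liste_observations):
--     """verifie si c'est une liste d'observation (single fused pass, no indexing)"""
--     if liste_observations == []:
--         return None
--     prev = None
--     for a, b in liste_observations:
--         if b == 0 or (prev is not None and prev > a):
--             return False
--         prev = a
--     return True
-- ===== Notes on version B (the rewrite author's own statement) =====
-- stated objective: simpler
-- what changed: Replaces the two index-based loops (an adjacent-pair sortedness scan over range(1,n) plus a separate zero-check loop over range(n)) with one fused element-wise pass carrying the previous first component, with no indexing at all.
import Mathlib
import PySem

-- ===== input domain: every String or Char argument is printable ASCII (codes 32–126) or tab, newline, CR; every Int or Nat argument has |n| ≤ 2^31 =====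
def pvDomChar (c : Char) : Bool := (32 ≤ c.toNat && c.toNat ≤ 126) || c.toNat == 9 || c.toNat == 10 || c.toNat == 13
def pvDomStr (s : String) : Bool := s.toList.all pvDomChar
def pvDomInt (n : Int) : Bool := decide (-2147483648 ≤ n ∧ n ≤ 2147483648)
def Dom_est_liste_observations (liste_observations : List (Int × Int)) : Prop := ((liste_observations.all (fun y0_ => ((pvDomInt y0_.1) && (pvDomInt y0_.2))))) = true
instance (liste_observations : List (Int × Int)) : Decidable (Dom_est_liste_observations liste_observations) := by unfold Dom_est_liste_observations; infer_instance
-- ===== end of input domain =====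

-- B replaces A's two index-based loops (adjacent sortedness scan + zero scan) by one
-- fused element-wise pass carrying the previous first component (objective: simpler).

-- ===== PORT A =====
-- for i in range(1,len(l)): if l[i-1][0] > l[i][0]: return False / return True
def estTrieAux (l : List (Int × Int)) : List Int → Bool
  | [] => true
  | i :: rest =>
      if (PySem.List.pyGetD l (i-1) (0,0)).1 > (PySem.List.pyGetD l i (0,0)).1 then false
      else estTrieAux l rest

def est_trié (liste_observations : List (Int × Int)) : Bool :=
  estTrieAux liste_observations (PySem.List.pyRange 1 (liste_observations.length : Int) 1)

-- for i in range(len(l)): if l[i][1] == 0: return False / return True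
def zeroLoopAux (l : List (Int × Int)) : List Int → Bool
  | [] => true
  | i :: rest =>
      if (PySem.List.pyGetD l i (0,0)).2 = 0 then false
      else zeroLoopAux l rest

def est_liste_observations (liste_observations : List (Int × Int)) : Option Bool :=
  if liste_observations = [] then none
  else if ¬ est_trié liste_observations then some false
  else some (zeroLoopAux liste_observations (PySem.List.pyRange 0 (liste_observations.length : Int) 1))

-- ===== PORT B =====
-- prev = None; for (a,b) in l: if b == 0 or (prev is not None and prev > a): return False; prev = a / return True
def bPass (prev : Option Int) : List (Int × Int) → Bool
  | [] => true
  | (a, b) :: rest =>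
      if b = 0 ∨ (∃ p, prev = some p ∧ p > a) then false
      else bPass (some a) rest

def est_liste_observations_alt (liste_observations : List (Int × Int)) : Option Bool :=
  if liste_observations = [] then none
  else some (bPass none liste_observations)

-- ===== PRECONDITION & SPEC =====
def Spec_est_liste_observations (liste_observations : List (Int × Int)) (out : Option Bool) : Prop := out = est_liste_observations_alt liste_observations
instance (liste_observations : List (Int × Int)) (out : Option Bool) : Decidable (Spec_est_liste_observations liste_observations out) := by unfold Spec_est_liste_observations; infer_instance

-- ===== CLAIM (what is proved, stated in full; the proofs are below) =====
def Claim_equal_est_liste_observations : Prop := ∀ (liste_observations : List (Int × Int)), Dom_est_liste_observations liste_observations → Spec_est_liste_observations liste_observations (est_liste_observations liste_observations)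

-- ===== LEMMAS AND PROOFS =====

-- canonical forms
def chkP (p : Int) : List (Int × Int) → Bool
  | [] => true
  | x :: r => !(decide (p > x.1)) && chkP x.1 r

def chk : List (Int × Int) → Bool
  | [] => true
  | x :: r => chkP x.1 r

def allnz (l : List (Int × Int)) : Bool := l.all (fun p => !(decide (p.2 = 0)))

theorem pyGetD_cons_succ (x : Int × Int) (l : List (Int × Int)) (i : Int) (hi : 0 ≤ i) (d : Int × Int) :
    PySem.List.pyGetD (x :: l) (i + 1) d = PySem.List.pyGetD l i d := by
  obtain ⟨k, rfl⟩ := Int.eq_ofNat_of_zero_le hi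
  have h1 : ((k : Int) + 1) = ((k + 1 : Nat) : Int) := by push_cast; ring
  rw [h1, PySem.List.pyGetD_natCast, PySem.List.pyGetD_natCast]
  rfl

theorem estTrieAux_shift (x : Int × Int) (l : List (Int × Int)) (idxs : List Int)
    (h : ∀ i ∈ idxs, 1 ≤ i) :
    estTrieAux (x :: l) (idxs.map (· + 1)) = estTrieAux l idxs := by
  induction idxs with
  | nil => rfl
  | cons i rest ih =>
      have hi : 1 ≤ i := h i (by simp)
      have h1 : PySem.List.pyGetD (x :: l) (i + 1) (0,0) = PySem.List.pyGetD l i (0,0) :=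
        pyGetD_cons_succ x l i (by omega) _
      have h2 : PySem.List.pyGetD (x :: l) (i + 1 - 1) (0,0) = PySem.List.pyGetD l (i - 1) (0,0) := by
        have : i + 1 - 1 = (i - 1) + 1 := by ring
        rw [this, pyGetD_cons_succ x l (i-1) (by omega)]
      simp only [List.map, estTrieAux, h1, h2]
      split
      · rfl
      · exact ih (fun j hj => h j (by simp [hj]))

theorem zeroLoopAux_shift (x : Int × Int) (l : List (Int × Int)) (idxs : List Int)
    (h : ∀ i ∈ idxs, 0 ≤ i) :
    zeroLoopAux (x :: l) (idxs.map (· + 1)) = zeroLoopAux l idxs := by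
  induction idxs with
  | nil => rfl
  | cons i rest ih =>
      have h1 : PySem.List.pyGetD (x :: l) (i + 1) (0,0) = PySem.List.pyGetD l i (0,0) :=
        pyGetD_cons_succ x l i (h i (by simp)) _
      simp only [List.map, zeroLoopAux, h1]
      split
      · rfl
      · exact ih (fun j hj => h j (by simp [hj]))

theorem pyRange_succ_eq_map (a b : Int) :
    PySem.List.pyRange (a + 1) (b + 1) 1 = (PySem.List.pyRange a b 1).map (· + 1) := by
  rw [PySem.List.pyRange_one, PySem.List.pyRange_one]
  have : b + 1 - (a + 1) = b - a := by ring
  rw [this, List.map_map]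
  exact List.map_congr_left (fun k _ => by simp; ring)

theorem est_trié_eq_chk (l : List (Int × Int)) : est_trié l = chk l := by
  induction l with
  | nil => rfl
  | cons x r ih =>
      cases r with
      | nil => rfl
      | cons y r' =>
          unfold est_trié at ih ⊢
          have hlen : ((x :: y :: r').length : Int) = ((y :: r').length : Int) + 1 := by
            simp
          have hcons : PySem.List.pyRange 1 ((x :: y :: r').length : Int) 1
              = 1 :: PySem.List.pyRange 2 ((x :: y :: r').length : Int) 1 := by
            rw [PySem.List.pyRange_one_cons (by simp)]; norm_num
          have hmap : PySem.List.pyRange 2 ((x :: y :: r').length : Int) 1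
              = (PySem.List.pyRange 1 ((y :: r').length : Int) 1).map (· + 1) := by
            rw [hlen]
            exact pyRange_succ_eq_map 1 ((y :: r').length : Int)
          rw [hcons, hmap]
          have hget0 : PySem.List.pyGetD (x :: y :: r') ((1:Int) - 1) (0,0) = x := by
            norm_num [PySem.List.pyGetD_zero_cons]
          have hget1 : PySem.List.pyGetD (x :: y :: r') (1:Int) (0,0) = y := by
            have : (1 : Int) = ((0:Int) + 1) := by ring
            rw [this, pyGetD_cons_succ _ _ 0 le_rfl, PySem.List.pyGetD_zero_cons]
          simp only [estTrieAux, hget0, hget1]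
          rw [estTrieAux_shift x (y :: r') _
              (fun i hi => ((PySem.List.mem_pyRange_one).1 hi).1)]
          rw [ih]
          by_cases h : x.1 > y.1
          · simp [h, chk, chkP]
          · simp [h, chk, chkP]

theorem zeroLoop_eq_allnz (l : List (Int × Int)) :
    zeroLoopAux l (PySem.List.pyRange 0 (l.length : Int) 1) = allnz l := by
  induction l with
  | nil => rfl
  | cons x r ih =>
      have hcons : PySem.List.pyRange 0 ((x :: r).length : Int) 1
          = 0 :: PySem.List.pyRange 1 ((x :: r).length : Int) 1 := by
        rw [PySem.List.pyRange_one_cons (by simp)]; norm_num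
      have hmap : PySem.List.pyRange 1 ((x :: r).length : Int) 1
          = (PySem.List.pyRange 0 (r.length : Int) 1).map (· + 1) := by
        have hlen : ((x :: r).length : Int) = (r.length : Int) + 1 := by simp
        rw [hlen]
        exact pyRange_succ_eq_map 0 (r.length : Int)
      rw [hcons, hmap]
      simp only [zeroLoopAux, PySem.List.pyGetD_zero_cons]
      rw [zeroLoopAux_shift x r _ (fun i hi => ((PySem.List.mem_pyRange_one).1 hi).1)]
      rw [ih]
      by_cases h : x.2 = 0
      · simp [h, allnz]
      · simp [h, allnz]

theorem bPass_some_eq (p : Int) (l : List (Int × Int)) :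
    bPass (some p) l = (chkP p l && allnz l) := by
  induction l generalizing p with
  | nil => rfl
  | cons x r ih =>
      obtain ⟨a, b⟩ := x
      simp only [bPass, ih]
      by_cases hb : b = 0 <;> by_cases hp : p > a <;>
        simp [hb, hp, chkP, allnz, Bool.and_comm]

theorem bPass_none_eq (l : List (Int × Int)) :
    bPass none l = (chk l && allnz l) := by
  cases l with
  | nil => rfl
  | cons x r =>
      obtain ⟨a, b⟩ := x
      simp only [bPass, bPass_some_eq]
      by_cases hb : b = 0 <;>
        simp [hb, chk, allnz, Bool.and_comm]

-- ===== VERDICT (by name: the statement is the Claim_ definition above) =====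
theorem est_liste_observations_spec : Claim_equal_est_liste_observations := by
  intro l _
  unfold Spec_est_liste_observations est_liste_observations est_liste_observations_alt
  by_cases hnil : l = []
  · simp [hnil]
  · simp only [hnil, if_false]
    rw [bPass_none_eq, est_trié_eq_chk, zeroLoop_eq_allnz]
    by_cases h : chk l = true
    · simp [h]
    · simp at h
      simp [h]
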